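-- pv_equiv track=rewrite | github.com/Mohit-Chaudhari/Level-Up-Coding | Introduction to Problem Solving/pattern_printing_1.py | solve
-- ===== SOURCE A (Python) =====
-- def solve(A):
--     arr = [[0 for i in range(A)] for j in range(A)]
--
--     for i in range(A):
--         val = 1
--         j = 0
--         while j <= i:
--             arr[i][j] = val
--             j += 1
--             val += 1
--
--     return arr
-- ===== SOURCE B (Python) =====
-- def solve(A):
--     out = []
--     row = [0] * A
--     for i in range(A):
--         row = row.copy()
--         row[i] = i + 1
--         out.append(row)
--     return out
-- ===== Notes on version B (the rewrite author's own statement) =====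
-- stated objective: alternative
-- what changed: B keeps a single running row as an accumulator and derives each row from the previous one by one single-cell update (row[i] = i+1), instead of allocating an all-zero A x A matrix and re-filling every row's whole prefix with an inner while-loop counter.
import Mathlib
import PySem

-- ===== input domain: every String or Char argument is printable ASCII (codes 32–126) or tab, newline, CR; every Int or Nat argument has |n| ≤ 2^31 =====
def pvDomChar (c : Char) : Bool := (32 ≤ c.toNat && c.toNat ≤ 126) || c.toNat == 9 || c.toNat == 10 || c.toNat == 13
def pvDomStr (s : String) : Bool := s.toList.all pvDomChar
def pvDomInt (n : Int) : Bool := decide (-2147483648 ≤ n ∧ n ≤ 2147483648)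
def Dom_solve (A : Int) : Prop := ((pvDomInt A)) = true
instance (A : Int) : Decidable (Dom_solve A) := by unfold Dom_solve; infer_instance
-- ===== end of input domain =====

-- B keeps one running row as an accumulator, turning each row into the next by a
-- single-cell update (row[i] = i+1), instead of A's zero-matrix allocation plus a
-- while-loop counter re-filling every row's whole prefix (objective: alternative).

-- ===== PORT A =====
-- Python 'arr[i][j] = v'; both loop indices are nonnegative here, so .toNat is exact
def setCell (arr : List (List Int)) (i j v : Int) : List (List Int) :=
  arr.set i.toNat ((arr.getD i.toNat []).set j.toNat v)

-- the inner 'while j <= i' loop of A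
def whileA (i j val : Int) (arr : List (List Int)) : List (List Int) :=
  if _h : j ≤ i then whileA i (j + 1) (val + 1) (setCell arr i j val) else arr
termination_by (i + 1 - j).toNat
decreasing_by omega

def solve (A : Int) : List (List Int) :=
  let arr := (PySem.List.pyRange 0 A 1).map (fun _ => (PySem.List.pyRange 0 A 1).map (fun _ => (0 : Int)))
  (PySem.List.pyRange 0 A 1).foldl (fun arr i => whileA i 0 1 arr) arr

-- ===== PORT B =====
-- state = (row, out); each step copies the row, updates one cell, appends the copy
def solve_alt (A : Int) : List (List Int) :=
  ((PySem.List.pyRange 0 A 1).foldl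
    (fun (st : List Int × List (List Int)) i =>
      let row := st.1.set i.toNat (i + 1)   -- row = row.copy(); row[i] = i + 1
      (row, st.2 ++ [row]))
    (List.replicate A.toNat (0 : Int), [])).2   -- row = [0] * A, out = []

-- ===== PRECONDITION & SPEC =====
def Spec_solve (A : Int) (out : List (List Int)) : Prop := out = solve_alt A
instance (A : Int) (out : List (List Int)) : Decidable (Spec_solve A out) := by unfold Spec_solve; infer_instance

-- ===== CLAIM (what is proved, stated in full; the proofs are below) =====
def Claim_equal_solve : Prop := ∀ (A : Int), Dom_solve A → Spec_solve A (solve A)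

-- ===== LEMMAS AND PROOFS =====

-- inner loop of A acting on the selected row alone
def loopRow (i j val : Int) (row : List Int) : List Int :=
  if _h : j ≤ i then loopRow i (j + 1) (val + 1) (row.set j.toNat val) else row
termination_by (i + 1 - j).toNat
decreasing_by omega

lemma whileA_eq_set : ∀ (d : Nat) (i j val : Int) (arr : List (List Int)),
    (i - j).toNat = d → 0 ≤ j → j ≤ i → i.toNat < arr.length →
    whileA i j val arr = arr.set i.toNat (loopRow i j val (arr.getD i.toNat [])) := by
  intro d
  induction d with
  | zero =>
    intro i j val arr hd hj hji hlen
    have hij : j = i := by omega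
    subst hij
    rw [whileA, loopRow, dif_pos le_rfl, dif_pos le_rfl, whileA, loopRow, dif_neg (by omega), dif_neg (by omega)]
    rfl
  | succ d ih =>
    intro i j val arr hd hj hji hlen
    have hlt : j < i := by omega
    rw [whileA, loopRow, dif_pos hji, dif_pos hji]
    rw [ih i (j + 1) (val + 1) (setCell arr i j val) (by omega) (by omega) (by omega)
        (by simpa [setCell] using hlen)]
    have hget : (setCell arr i j val).getD i.toNat [] = (arr.getD i.toNat []).set j.toNat val := by
      simp [setCell, List.getD_eq_getElem?_getD, hlen]
    rw [hget, setCell, List.set_set]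

lemma loopRow_spec : ∀ (d : Nat) (i j val : Int) (row : List Int),
    (i + 1 - j).toNat = d → 0 ≤ j → j.toNat + d ≤ row.length →
    loopRow i j val row =
      row.take j.toNat ++ (List.range d).map (fun (t : Nat) => val + (t : Int)) ++ row.drop (j.toNat + d) := by
  intro d
  induction d with
  | zero =>
    intro i j val row hd hj hlen
    rw [loopRow, dif_neg (by omega)]
    simp
  | succ d ih =>
    intro i j val row hd hj hlen
    have hji : j ≤ i := by omega
    rw [loopRow, dif_pos hji]
    rw [ih i (j + 1) (val + 1) (row.set j.toNat val) (by omega) (by omega)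
        (by simp; omega)]
    have hjl : j.toNat < row.length := by omega
    rw [List.set_eq_take_append_cons_drop]
    rw [if_pos hjl]
    have hj1 : (j + 1).toNat = j.toNat + 1 := by omega
    have h1 : (row.take j.toNat ++ val :: row.drop (j.toNat + 1)).take (j + 1).toNat
        = row.take j.toNat ++ [val] := by
      rw [hj1, List.take_append, List.length_take]
      have hmin : min j.toNat row.length = j.toNat := by omega
      rw [hmin, List.take_take]
      have : j.toNat + 1 - j.toNat = 1 := by omega
      rw [this]
      simp
    have h2 : (row.take j.toNat ++ val :: row.drop (j.toNat + 1)).drop ((j + 1).toNat + d)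
        = row.drop (j.toNat + (d + 1)) := by
      rw [hj1, List.drop_append]
      have e1 : (row.take j.toNat).drop (j.toNat + 1 + d) = [] :=
        List.drop_eq_nil_of_le (by simp [List.length_take]; omega)
      have e2 : j.toNat + 1 + d - (row.take j.toNat).length = d + 1 := by
        simp [List.length_take]; omega
      rw [e1, e2, List.nil_append, List.drop_succ_cons, List.drop_drop]
      congr 1
      omega
    rw [h1, h2, List.range_succ_eq_map, List.map_cons, List.map_map]
    have hmap : List.map ((fun (t : Nat) => val + (t : Int)) ∘ Nat.succ) (List.range d)
        = List.map (fun (t : Nat) => (val + 1) + (t : Int)) (List.range d) := by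
      apply List.map_congr_left
      intro t _
      simp [Function.comp]
      ring
    rw [hmap]
    simp

def zrow (n : Nat) : List Int := List.replicate n 0

-- common target: B's running row after m steps (= A's finished row m-1, padded with zeros)
def rowSt (n m : Nat) : List Int :=
  (List.range m).map (fun (t : Nat) => (1 : Int) + (t : Int)) ++ List.replicate (n - m) 0

lemma row_done (n k : Nat) (hk : k < n) :
    loopRow (k : Int) 0 1 (zrow n) = rowSt n (k + 1) := by
  have hd : ((k : Int) + 1 - 0).toNat = k + 1 := by omega
  rw [loopRow_spec (k + 1) (k : Int) 0 1 (zrow n) hd le_rfl (by simp [zrow]; omega)]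
  simp [zrow, rowSt, List.drop_replicate]

lemma fold_inv (n : Nat) : ∀ (m : Nat), m ≤ n →
    ((List.range m).map (fun (k : Nat) => (k : Int))).foldl (fun arr i => whileA i 0 1 arr)
        (List.replicate n (zrow n))
      = (List.range m).map (fun k => rowSt n (k + 1)) ++ List.replicate (n - m) (zrow n) := by
  intro m
  induction m with
  | zero => simp
  | succ m ih =>
    intro hm
    have hmn : m < n := by omega
    rw [List.range_succ, List.map_append, List.foldl_append, ih (by omega)]
    simp only [List.map_cons, List.map_nil, List.foldl_cons, List.foldl_nil]
    set cur := (List.range m).map (fun k => rowSt n (k + 1)) ++ List.replicate (n - m) (zrow n) with hcur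
    have hlen : cur.length = n := by simp [hcur]; omega
    have hget : cur.getD (m : Int).toNat [] = zrow n := by
      have : (m : Int).toNat = m := by omega
      rw [this]
      have hml : m < cur.length := by omega
      rw [List.getD_eq_getElem cur [] hml]
      rw [List.getElem_append_right (by simp)]
      simp [List.getElem_replicate]
    rw [whileA_eq_set (m : Int).toNat (m : Int) 0 1 cur (by omega) le_rfl (by omega) (by omega)]
    rw [hget, row_done n m hmn]
    have hsplit : n - m = (n - m - 1) + 1 := by omega
    rw [List.set_append_right _ _ (by simp)]
    simp only [List.length_map, List.length_range]
    have : (m : Int).toNat - m = 0 := by omega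
    rw [this, hsplit, List.replicate_succ, List.set_cons_zero]
    simp [List.map_append, Nat.sub_sub]

-- B's single-cell update advances the running row
lemma rowSt_set (n m : Nat) (hm : m < n) :
    (rowSt n m).set m ((m : Int) + 1) = rowSt n (m + 1) := by
  have hsplit : n - m = (n - m - 1) + 1 := by omega
  rw [rowSt, List.set_append_right _ _ (by simp)]
  simp only [List.length_map, List.length_range, Nat.sub_self]
  rw [hsplit, List.replicate_succ, List.set_cons_zero]
  rw [rowSt, List.range_succ, List.map_append]
  simp [Nat.sub_sub]

  ring

lemma fold_inv_B (n : Nat) : ∀ (m : Nat), m ≤ n →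
    ((List.range m).map (fun (k : Nat) => (k : Int))).foldl
      (fun (st : List Int × List (List Int)) i =>
        (st.1.set i.toNat (i + 1), st.2 ++ [st.1.set i.toNat (i + 1)]))
      (List.replicate n (0 : Int), [])
    = (rowSt n m, (List.range m).map (fun k => rowSt n (k + 1))) := by
  intro m
  induction m with
  | zero => intro _; simp [rowSt]
  | succ m ih =>
    intro hm
    have hmn : m < n := by omega
    rw [List.range_succ, List.map_append, List.foldl_append, ih (by omega)]
    simp only [List.map_cons, List.map_nil, List.foldl_cons, List.foldl_nil]
    have ht : ((m : Int)).toNat = m := by omega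
    rw [ht, rowSt_set n m hmn]
    simp

lemma solve_eq (A : Int) : solve A = solve_alt A := by
  rcases Int.lt_or_le A 0 with hA | hA
  · have hempty : PySem.List.pyRange 0 A 1 = [] := by
      rw [PySem.List.pyRange_of_pos 0 A (by norm_num), if_neg (by omega)]
      simp
    rw [solve, solve_alt, hempty]
    simp
  · obtain ⟨n, rfl⟩ : ∃ n : Nat, A = (n : Int) := ⟨A.toNat, by omega⟩
    rw [solve, solve_alt, PySem.List.pyRange_zero_natCast]
    have hz : (List.map (fun (k : Nat) => (k : Int)) (List.range n)).map
        (fun _ => (List.map (fun (k : Nat) => (k : Int)) (List.range n)).map (fun _ => (0 : Int)))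
        = List.replicate n (zrow n) := by
      rw [List.map_const', List.map_const']
      simp [zrow]
    have hnat : ((n : Int)).toNat = n := by omega
    rw [hz, fold_inv n n le_rfl, hnat, fold_inv_B n n le_rfl]
    simp

-- ===== VERDICT (by name: the statement is the Claim_ definition above) =====
theorem solve_spec : Claim_equal_solve := by
  intro A _
  unfold Spec_solve
  exact solve_eq A
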